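-- pv_equiv track=rewrite | github.com/SounceKrimer/Python_Docker | MKR1/my_module.py | compare_mods
-- ===== SOURCE A (Python) =====
-- def compare_mods(nums):
--     """Порівняння модулів чисел і формування рядка типу |4| = |-4| < |9|"""
--     mods = [abs(x) for x in nums]
--     pairs = list(zip(mods, nums))
--     pairs.sort(key=lambda x: x[0])  # сортуємо за модулем
--
--     result_parts = [f"|{pairs[0][1]}|"]
--     for i in range(1, len(pairs)):
--         if pairs[i][0] == pairs[i - 1][0]:
--             result_parts.append(f"= |{pairs[i][1]}|")
--         else:
--             result_parts.append(f"< |{pairs[i][1]}|")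
--
--     return " ".join(result_parts)
-- ===== SOURCE B (Python) =====
-- def compare_mods(nums):
--     """Group-based rewrite: sort by modulus, split into runs of equal modulus,
--     join each run with " = " and the runs with " < "."""
--     s = sorted(nums, key=abs)
--     groups = []
--     i = 0
--     while i < len(s):
--         j = i + 1
--         while j < len(s) and abs(s[j]) == abs(s[i]):
--             j += 1
--         groups.append(s[i:j])
--         i = j
--     parts = [" = ".join(f"|{v}|" for v in g) for g in groups]
--     return parts[0] + "".join(" < " + p for p in parts[1:])
-- ===== Notes on version B (the rewrite author's own statement) =====
-- stated objective: alternative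
-- what changed: A zips each number with its modulus, sorts the pairs and emits a separator per adjacent pair in an index loop; B sorts the numbers by abs, splits the sorted list into maximal runs of equal modulus, joins each run with ' = ' and the runs with ' < '.
import Mathlib
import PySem

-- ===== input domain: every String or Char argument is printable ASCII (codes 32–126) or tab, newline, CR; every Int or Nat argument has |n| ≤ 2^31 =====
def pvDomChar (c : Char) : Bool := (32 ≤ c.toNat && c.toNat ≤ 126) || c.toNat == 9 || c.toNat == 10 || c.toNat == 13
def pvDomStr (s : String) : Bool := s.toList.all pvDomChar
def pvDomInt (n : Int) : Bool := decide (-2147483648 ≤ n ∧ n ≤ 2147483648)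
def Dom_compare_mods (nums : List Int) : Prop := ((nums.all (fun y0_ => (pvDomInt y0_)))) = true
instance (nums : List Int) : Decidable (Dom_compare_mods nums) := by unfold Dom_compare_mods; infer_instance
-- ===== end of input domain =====

-- B rewrites A's pairwise adjacent-comparison loop as a grouping pass: sort by modulus,
-- split into runs of equal modulus, join runs with " = " inside and " < " between (alternative, not faster).

-- ===== PORT A =====
-- literal port of A: mods list, zip, stable sort by first component, index loop over range(1, len)
def compare_mods (nums : List Int) : String :=
  let mods := nums.map (fun x => |x|)
  let pairs := mods.zip nums
  let ps := PySem.List.sorted pairs (fun p => p.1) false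
  match ps with
  | [] => ""   -- Python raises IndexError (pairs[0]) here; excluded by Pre_compare_mods
  | p0 :: _ =>
    let parts : List String := ["|" ++ PySem.Int.toStr p0.2 ++ "|"]
    let parts := (PySem.List.pyRange 1 (ps.length : Int) 1).foldl (fun acc i =>
      if (PySem.List.pyGetD ps i (0, 0)).1 = (PySem.List.pyGetD ps (i - 1) (0, 0)).1 then
        acc ++ ["= |" ++ PySem.Int.toStr (PySem.List.pyGetD ps i (0, 0)).2 ++ "|"]
      else
        acc ++ ["< |" ++ PySem.Int.toStr (PySem.List.pyGetD ps i (0, 0)).2 ++ "|"]) parts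
    PySem.Str.join " " parts

-- ===== PORT B =====
def cmBox (v : Int) : String := "|" ++ PySem.Int.toStr v ++ "|"

-- the inner while loop: how far the run of elements with modulus |x| extends (j - i - 1)
def cmTake (x : Int) : List Int → Nat
  | [] => 0
  | y :: t => if |y| = |x| then cmTake x t + 1 else 0

-- the outer while loop: split the sorted list into maximal runs of equal modulus
def cmGroups : List Int → List (List Int)
  | [] => []
  | x :: t =>
    let k := cmTake x t
    (x :: t.take k) :: cmGroups (t.drop k)
termination_by t => t.length
decreasing_by
  simp only [List.length_drop, List.length_cons]
  omega

def compare_mods_alt (nums : List Int) : String :=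
  let s := PySem.List.sorted nums (fun x => |x|) false
  let groups := cmGroups s
  let parts := groups.map (fun g => PySem.Str.join " = " (g.map cmBox))
  match parts with
  | [] => ""   -- Python raises IndexError (parts[0]) here; excluded by Pre_compare_mods
  | p0 :: rest => p0 ++ PySem.Str.join "" (rest.map (fun p => " < " ++ p))

-- ===== PRECONDITION & SPEC =====
-- Pre_ excludes exactly the empty list, on which both Pythons raise IndexError.
def Pre_compare_mods (nums : List Int) : Prop := nums ≠ []
instance (nums : List Int) : Decidable (Pre_compare_mods nums) := by unfold Pre_compare_mods; infer_instance
def pvWitness_compare_mods : List Int := ([1, -2, 2])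

def Spec_compare_mods (nums : List Int) (out : String) : Prop := out = compare_mods_alt nums
instance (nums : List Int) (out : String) : Decidable (Spec_compare_mods nums out) := by unfold Spec_compare_mods; infer_instance

-- ===== CLAIM (what is proved, stated in full; the proofs are below) =====
def Claim_equal_compare_mods : Prop := ∀ (nums : List Int), Dom_compare_mods nums → Pre_compare_mods nums → Spec_compare_mods nums (compare_mods nums)

-- ===== LEMMAS AND PROOFS =====

-- A's appended parts, written per element: the separator string for y after previous element p
def sepsA : Int → List Int → List String
  | _, [] => []
  | p, y :: u =>
    (if |y| = |p| then "= |" ++ PySem.Int.toStr y ++ "|" else "< |" ++ PySem.Int.toStr y ++ "|") :: sepsA y u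

-- the pairing A computes via zip
def cmPair (x : Int) : Int × Int := (|x|, x)

theorem cmTake_congr (x y : Int) (h : |x| = |y|) (t : List Int) : cmTake x t = cmTake y t := by
  induction t with
  | nil => rfl
  | cons z u ih => simp only [cmTake, h, ih]

theorem zip_mods (nums : List Int) :
    (nums.map (fun x => |x|)).zip nums = nums.map cmPair := by
  induction nums with
  | nil => rfl
  | cons x t ih => simp [cmPair, ih]

theorem insertBy_map_pair (x : Int) (acc : List Int) :
    PySem.List.insertBy (fun a b : Int × Int => decide (a.1 < b.1)) (cmPair x) (acc.map cmPair)
      = (PySem.List.insertBy (fun a b : Int => decide (|a| < |b|)) x acc).map cmPair := by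
  induction acc with
  | nil => rfl
  | cons y ys ih =>
    simp only [List.map_cons, PySem.List.insertBy, cmPair]
    split <;> simp_all [cmPair]

theorem foldl_insertBy_map_pair (nums : List Int) (acc : List Int) :
    (nums.map cmPair).foldl
        (fun acc p => PySem.List.insertBy (fun a b : Int × Int => decide (a.1 < b.1)) p acc)
        (acc.map cmPair)
      = (nums.foldl (fun acc x => PySem.List.insertBy (fun a b : Int => decide (|a| < |b|)) x acc) acc).map cmPair := by
  induction nums generalizing acc with
  | nil => rfl
  | cons x t ih =>
    simp only [List.map_cons, List.foldl_cons]
    rw [insertBy_map_pair]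
    exact ih _

-- sorting the (|x|, x) pairs by fst is mapping the sort of the numbers by modulus
theorem sorted_map_pair (nums : List Int) :
    PySem.List.sorted (nums.map cmPair) (fun p => p.1) false
      = (PySem.List.sorted nums (fun x => |x|) false).map cmPair := by
  rw [PySem.List.sorted_eq_foldl_insertBy, PySem.List.sorted_eq_foldl_insertBy]
  simpa using foldl_insertBy_map_pair nums []

-- the index loop, re-indexed through List.range, becomes sepsA
theorem range_getD_eq_sepsA (t : List Int) (x : Int) :
    (List.range t.length).map (fun k =>
      if (((x :: t).map cmPair).getD (k + 1) (0, 0)).1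
          = (((x :: t).map cmPair).getD k (0, 0)).1 then
        "= |" ++ PySem.Int.toStr ((((x :: t).map cmPair).getD (k + 1) (0, 0)).2) ++ "|"
      else
        "< |" ++ PySem.Int.toStr ((((x :: t).map cmPair).getD (k + 1) (0, 0)).2) ++ "|")
      = sepsA x t := by
  induction t generalizing x with
  | nil => rfl
  | cons y u ih =>
    simp only [List.length_cons, List.range_succ_eq_map, List.map_cons, List.map_map]
    refine congrArg₂ List.cons ?_ ?_
    · simp [cmPair]
    · rw [← ih y]
      apply List.map_congr_left
      intro k _
      simp only [Function.comp_apply, List.map_cons, List.getD_cons_succ]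

-- A's index loop over range(1, len) is sepsA on the underlying sorted numbers
theorem range_map_eq_sepsA (t : List Int) (x : Int) :
    (PySem.List.pyRange 1 (((x :: t).map cmPair).length : Int) 1).map (fun i =>
      if (PySem.List.pyGetD ((x :: t).map cmPair) i (0, 0)).1
          = (PySem.List.pyGetD ((x :: t).map cmPair) (i - 1) (0, 0)).1 then
        "= |" ++ PySem.Int.toStr (PySem.List.pyGetD ((x :: t).map cmPair) i (0, 0)).2 ++ "|"
      else
        "< |" ++ PySem.Int.toStr (PySem.List.pyGetD ((x :: t).map cmPair) i (0, 0)).2 ++ "|")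
      = sepsA x t := by
  rw [PySem.List.pyRange_one, List.map_map]
  have hlen : ((((x :: t).map cmPair).length : Int) - 1).toNat = t.length := by
    simp
  rw [hlen, ← range_getD_eq_sepsA t x]
  apply List.map_congr_left
  intro k _
  have h1 : (1 : Int) + (k : Int) = ((k + 1 : Nat) : Int) := by push_cast; ring
  have h2 : ((k + 1 : Nat) : Int) - 1 = ((k : Nat) : Int) := by push_cast; ring
  simp only [Function.comp_apply, h1, h2, PySem.List.pyGetD_natCast]

-- B's output as a function of the sorted list
def cmOut (s : List Int) : String :=
  match (cmGroups s).map (fun g => PySem.Str.join " = " (g.map cmBox)) with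
  | [] => ""
  | p0 :: rest => p0 ++ PySem.Str.join "" (rest.map (fun p => " < " ++ p))

theorem cmGroups_nil : cmGroups [] = [] := by rw [cmGroups]

theorem cmGroups_cons (x : Int) (t : List Int) :
    cmGroups (x :: t) = (x :: t.take (cmTake x t)) :: cmGroups (t.drop (cmTake x t)) := by
  rw [cmGroups]

-- small String-level join facts (via the PySem.Chars lemmas)
theorem sjoin_singleton (sep a : String) : PySem.Str.join sep [a] = a := by
  rw [← String.toList_inj, PySem.Str.toList_join]
  simp [PySem.Chars.join_singleton]

theorem sjoin_cons_cons (sep a b : String) (l : List String) :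
    PySem.Str.join sep (a :: b :: l) = a ++ sep ++ PySem.Str.join sep (b :: l) := by
  rw [← String.toList_inj, PySem.Str.toList_join]
  simp [PySem.Chars.join_cons_cons, PySem.Str.toList_join, String.toList_append]

theorem sjoin_cons_append (sep c b : String) (l : List String) :
    PySem.Str.join sep ((c ++ b) :: l) = c ++ PySem.Str.join sep (b :: l) := by
  cases l with
  | nil => rw [sjoin_singleton, sjoin_singleton]
  | cons d l' =>
    rw [sjoin_cons_cons, sjoin_cons_cons]
    simp [String.append_assoc]

theorem sjoin_empty_cons (a : String) (l : List String) :
    PySem.Str.join "" (a :: l) = a ++ PySem.Str.join "" l := by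
  cases l with
  | nil =>
    rw [sjoin_singleton]
    rw [show PySem.Str.join "" ([] : List String) = "" from rfl, String.append_empty]
  | cons b l' =>
    rw [sjoin_cons_cons]
    simp [String.append_empty]

theorem cmOut_cons_eq (x y : Int) (u : List Int) (h : |y| = |x|) :
    cmOut (x :: y :: u) = cmBox x ++ " = " ++ cmOut (y :: u) := by
  have hk : cmTake x (y :: u) = cmTake y u + 1 := by
    simp only [cmTake, h, if_pos]
    rw [cmTake_congr x y h.symm]
  simp only [cmOut, cmGroups_cons, hk]
  simp only [List.take_succ_cons, List.drop_succ_cons, List.map_cons]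
  rw [sjoin_cons_cons]
  cases hgu : cmGroups (u.drop (cmTake y u)) with
  | nil => simp [String.append_assoc]
  | cons g gs => simp [String.append_assoc]


theorem cmOut_cons_lt (x y : Int) (u : List Int) (h : ¬ |y| = |x|) :
    cmOut (x :: y :: u) = cmBox x ++ " < " ++ cmOut (y :: u) := by
  have hk : cmTake x (y :: u) = 0 := by simp [cmTake, h]
  rw [show cmOut (x :: y :: u)
      = PySem.Str.join " = " ((x :: (y :: u).take (cmTake x (y :: u))).map cmBox)
        ++ PySem.Str.join ""
            (((cmGroups ((y :: u).drop (cmTake x (y :: u)))).map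
              (fun g => PySem.Str.join " = " (g.map cmBox))).map (fun p => " < " ++ p))
      from by rw [cmOut, cmGroups_cons]; simp only [List.map_cons]]
  rw [hk]
  simp only [List.take_zero, List.drop_zero, List.map_cons, List.map_nil]
  rw [sjoin_singleton]
  rw [cmOut, cmGroups_cons]
  simp only [List.map_cons]
  rw [sjoin_empty_cons]
  simp [String.append_assoc]

-- the central equation: A's " ".join of head-plus-separators equals B's grouped rendering
theorem join_sepsA_eq_cmOut (t : List Int) (x : Int) :
    PySem.Str.join " " (cmBox x :: sepsA x t) = cmOut (x :: t) := by
  induction t generalizing x with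
  | nil =>
    rw [show sepsA x [] = [] from rfl, sjoin_singleton]
    rw [cmOut, cmGroups_cons]
    simp only [cmTake, List.take_nil, List.drop_nil, List.map_cons, List.map_nil, cmGroups_nil]
    rw [sjoin_singleton]
    rw [show PySem.Str.join "" ([] : List String) = "" from rfl, String.append_empty]
  | cons y u ih =>
    by_cases h : |y| = |x|
    · rw [show sepsA x (y :: u)
          = ("= |" ++ PySem.Int.toStr y ++ "|") :: sepsA y u from by simp [sepsA, h]]
      rw [sjoin_cons_cons]
      have hb : ("= |" ++ PySem.Int.toStr y ++ "|" : String) = "= " ++ cmBox y := by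
        simp [cmBox, ← String.append_assoc]
      rw [hb, sjoin_cons_append, ih y, cmOut_cons_eq x y u h]
      simp only [String.append_assoc]
      congr 1
    · rw [show sepsA x (y :: u)
          = ("< |" ++ PySem.Int.toStr y ++ "|") :: sepsA y u from by simp [sepsA, h]]
      rw [sjoin_cons_cons]
      have hb : ("< |" ++ PySem.Int.toStr y ++ "|" : String) = "< " ++ cmBox y := by
        simp [cmBox, ← String.append_assoc]
      rw [hb, sjoin_cons_append, ih y, cmOut_cons_lt x y u h]
      simp only [String.append_assoc]
      congr 1

-- ===== VERDICT (by name: the statement is the Claim_ definition above) =====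
theorem compare_mods_spec : Claim_equal_compare_mods := by
  intro nums _ hpre
  simp only [Spec_compare_mods, compare_mods, compare_mods_alt]
  rw [zip_mods, sorted_map_pair]
  cases hs : PySem.List.sorted nums (fun x => |x|) false with
  | nil => exact absurd ((PySem.List.sorted_eq_nil_iff nums _ false).mp hs) hpre
  | cons x t =>
    simp only [List.map_cons]
    have hfold : ∀ (ps : List (Int × Int)) (init : List String),
        (PySem.List.pyRange 1 (ps.length : Int) 1).foldl (fun acc i =>
          if (PySem.List.pyGetD ps i (0, 0)).1 = (PySem.List.pyGetD ps (i - 1) (0, 0)).1 then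
            acc ++ ["= |" ++ PySem.Int.toStr (PySem.List.pyGetD ps i (0, 0)).2 ++ "|"]
          else
            acc ++ ["< |" ++ PySem.Int.toStr (PySem.List.pyGetD ps i (0, 0)).2 ++ "|"]) init
        = init ++ (PySem.List.pyRange 1 (ps.length : Int) 1).map (fun i =>
          if (PySem.List.pyGetD ps i (0, 0)).1 = (PySem.List.pyGetD ps (i - 1) (0, 0)).1 then
            "= |" ++ PySem.Int.toStr (PySem.List.pyGetD ps i (0, 0)).2 ++ "|"
          else
            "< |" ++ PySem.Int.toStr (PySem.List.pyGetD ps i (0, 0)).2 ++ "|") := by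
      intro ps init
      rw [← PySem.List.foldl_append_singleton_eq_map]
      apply PySem.List.foldl_congr_mem
      intro acc i _
      split <;> rfl
    rw [show (cmPair x :: t.map cmPair) = (x :: t).map cmPair from rfl, hfold, range_map_eq_sepsA]
    have hhead : ("|" ++ PySem.Int.toStr (cmPair x).2 ++ "|" : String) = cmBox x := rfl
    rw [hhead]
    rw [show ([cmBox x] : List String) ++ sepsA x t = cmBox x :: sepsA x t from rfl]
    rw [join_sepsA_eq_cmOut t x]
    rfl
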